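-- pv_equiv track=rewrite | github.com/shahbajsingh/leetcode | other/mx_shapes.py | uniqueShapesInMatrix
-- ===== SOURCE A (Python) =====
-- def uniqueShapesInMatrix(grid):
--     rows, cols = len(grid), len(grid[0])
--     visited = set()
--     unique_shapes = set()
--
--     # 8 possible directions: up, down, left, right, and 4 diagonals
--     directions = [
--         (1, 0), (-1, 0), (0, 1), (0, -1),  # cardinal directions
--         (1, 1), (1, -1), (-1, 1), (-1, -1)  # diagonals
--     ]
--
--     def dfs(r, c, base_r, base_c, shape):
--         if (r < 0 or r >= rows or c < 0 or c >= cols or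
--             grid[r][c] == 0 or (r, c) in visited):
--             return
--         visited.add((r, c))
--         shape.append((r - base_r, c - base_c))  # relative coordinates
--         for dr, dc in directions:
--             dfs(r + dr, c + dc, base_r, base_c, shape)
--
--     for r in range(rows):
--         for c in range(cols):
--             if grid[r][c] == 1 and (r, c) not in visited:
--                 shape = []
--                 dfs(r, c, r, c, shape)
--                 unique_shapes.add(tuple(shape))
--
--     return len(unique_shapes)
-- ===== SOURCE B (Python) =====
-- def uniqueShapesInMatrix(grid):
--     rows, cols = len(grid), len(grid[0])
--     visited = set()
--     shapes = set()
--     for idx in range(rows * cols):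
--         r, c = divmod(idx, cols)
--         if grid[r][c] != 1 or (r, c) in visited:
--             continue
--         shape = []
--         stack = [(r, c)]
--         while stack:
--             cr, cc = stack.pop()
--             if (0 <= cr < rows and 0 <= cc < cols and
--                     grid[cr][cc] != 0 and (cr, cc) not in visited):
--                 visited.add((cr, cc))
--                 shape.append((cr - r, cc - c))
--                 for dr, dc in ((-1, -1), (-1, 1), (1, -1), (1, 1),
--                                (0, -1), (0, 1), (-1, 0), (1, 0)):
--                     stack.append((cr + dr, cc + dc))
--         shapes.add(tuple(shape))
--     return len(shapes)
-- ===== Notes on version B (the rewrite author's own statement) =====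
-- stated objective: alternative
-- what changed: The recursive 8-connected DFS inside a nested row/column scan is replaced by a single flat loop over range(rows*cols) with divmod recovering (r, c) and an iterative explicit-stack flood fill (guard-on-pop, reversed direction pushes), visiting cells in the identical order without recursion.
import Mathlib
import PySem

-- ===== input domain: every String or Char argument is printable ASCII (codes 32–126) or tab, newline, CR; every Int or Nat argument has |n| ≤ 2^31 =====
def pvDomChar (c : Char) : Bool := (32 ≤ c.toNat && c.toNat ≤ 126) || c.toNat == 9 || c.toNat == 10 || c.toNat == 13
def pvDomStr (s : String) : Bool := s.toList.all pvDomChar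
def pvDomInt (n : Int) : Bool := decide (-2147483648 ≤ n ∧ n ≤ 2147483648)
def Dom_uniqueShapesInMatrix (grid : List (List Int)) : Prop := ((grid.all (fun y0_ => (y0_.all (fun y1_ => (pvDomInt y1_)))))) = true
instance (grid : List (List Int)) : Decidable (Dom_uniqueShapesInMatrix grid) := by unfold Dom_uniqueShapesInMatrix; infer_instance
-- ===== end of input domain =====

-- B replaces A's recursive DFS over a nested row/column loop by an iterative explicit-stack
-- flood fill driven by a single flat index loop (divmod); return values agree on Pre_.

-- ===== PORT A =====

-- A's direction list, verbatim
def pvDirs : List (Int × Int) :=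
  [(1, 0), (-1, 0), (0, 1), (0, -1), (1, 1), (1, -1), (-1, 1), (-1, -1)]

-- grid[r][c]; A only evaluates it under 0 ≤ r < rows, 0 ≤ c < cols (guard order) or,
-- in the outer loop, under Pre_, so the defaults are never consulted
def pvCell (grid : List (List Int)) (r c : Int) : Int :=
  PySem.List.pyGetD (PySem.List.pyGetD grid r []) c 0

-- A's recursive dfs, state = (visited, shape); the fuel only makes the recursion
-- structural (chosen large enough in uniqueShapesInMatrix)
def pvDfsA (grid : List (List Int)) (rows cols br bc : Int) :
    Nat → Int × Int → PySem.Set (Int × Int) × List (Int × Int) →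
    PySem.Set (Int × Int) × List (Int × Int)
  | 0, _, s => s
  | fuel + 1, p, s =>
    if decide (p.1 < 0 ∨ rows ≤ p.1 ∨ p.2 < 0 ∨ cols ≤ p.2 ∨
        pvCell grid p.1 p.2 = 0 ∨ (p.1, p.2) ∈ s.1) then s
    else
      pvDirs.foldl (fun t d => pvDfsA grid rows cols br bc fuel (p.1 + d.1, p.2 + d.2) t)
        (PySem.Set.add s.1 p, s.2 ++ [(p.1 - br, p.2 - bc)])

def uniqueShapesInMatrix (grid : List (List Int)) : Int :=
  let rows : Int := grid.length
  let cols : Int := (PySem.List.pyGetD grid 0 []).length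
  let fin :=
    (PySem.List.pyRange 0 rows 1).foldl (fun st r =>
      (PySem.List.pyRange 0 cols 1).foldl (fun st c =>
        if pvCell grid r c = 1 ∧ (r, c) ∉ st.1 then
          let res := pvDfsA grid rows cols r c ((rows * cols).toNat + 1) (r, c) (st.1, [])
          (res.1, PySem.Set.add st.2 res.2)
        else st) st)
      (((PySem.Set.empty : PySem.Set (Int × Int)),
        (PySem.Set.empty : PySem.Set (List (Int × Int)))))
  PySem.Set.len fin.2

-- ===== PORT B =====

-- B's direction tuple, verbatim (the order it pushes on the stack)
def pvDirsB : List (Int × Int) :=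
  [(-1, -1), (-1, 1), (1, -1), (1, 1), (0, -1), (0, 1), (-1, 0), (1, 0)]

def pvCellB (grid : List (List Int)) (r c : Int) : Int :=
  PySem.List.pyGetD (PySem.List.pyGetD grid r []) c 0

-- B's while loop: pop (head = top of stack), positively guarded visit, push the
-- eight neighbours; visited and shape are carried separately as in Source B
def pvFloodB (grid : List (List Int)) (rows cols br bc : Int) :
    Nat → List (Int × Int) → PySem.Set (Int × Int) → List (Int × Int) →
    PySem.Set (Int × Int) × List (Int × Int)
  | 0, _, vis, shape => (vis, shape)
  | _ + 1, [], vis, shape => (vis, shape)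
  | fuel + 1, (cr, cc) :: rest, vis, shape =>
    if 0 ≤ cr ∧ cr < rows ∧ 0 ≤ cc ∧ cc < cols ∧
        pvCellB grid cr cc ≠ 0 ∧ (cr, cc) ∉ vis then
      pvFloodB grid rows cols br bc fuel
        (pvDirsB.foldl (fun st d => (cr + d.1, cc + d.2) :: st) rest)
        (PySem.Set.add vis (cr, cc)) (shape ++ [(cr - br, cc - bc)])
    else pvFloodB grid rows cols br bc fuel rest vis shape

def uniqueShapesInMatrix_alt (grid : List (List Int)) : Int :=
  let rows : Int := grid.length
  let cols : Int := (PySem.List.pyGetD grid 0 []).length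
  let fin :=
    (PySem.List.pyRange 0 (rows * cols) 1).foldl (fun st idx =>
      let r := PySem.Int.floordiv idx cols
      let c := PySem.Int.mod idx cols
      if pvCellB grid r c ≠ 1 ∨ (r, c) ∈ st.1 then st
      else
        let res := pvFloodB grid rows cols r c (9 * (rows * cols).toNat + 2) [(r, c)] st.1 []
        (res.1, PySem.Set.add st.2 res.2))
      (((PySem.Set.empty : PySem.Set (Int × Int)),
        (PySem.Set.empty : PySem.Set (List (Int × Int)))))
  PySem.Set.len fin.2

-- ===== PRECONDITION & SPEC =====

-- Pre_ excludes exactly the inputs on which the Python raises IndexError: the empty grid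
-- (grid[0]) and grids in which some row is shorter than the first row (grid[r][c] is read
-- by the outer loop for every c < len(grid[0])).
def Pre_uniqueShapesInMatrix (grid : List (List Int)) : Prop :=
  grid ≠ [] ∧ ∀ row ∈ grid, (PySem.List.pyGetD grid 0 []).length ≤ row.length

instance (grid : List (List Int)) : Decidable (Pre_uniqueShapesInMatrix grid) := by
  unfold Pre_uniqueShapesInMatrix; infer_instance

def pvWitness_uniqueShapesInMatrix : List (List Int) := [[1, 0], [0, 1]]

def Spec_uniqueShapesInMatrix (grid : List (List Int)) (out : Int) : Prop :=
  out = uniqueShapesInMatrix_alt grid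
instance (grid : List (List Int)) (out : Int) : Decidable (Spec_uniqueShapesInMatrix grid out) := by
  unfold Spec_uniqueShapesInMatrix; infer_instance

-- ===== CLAIM (what is proved, stated in full; the proofs are below) =====
def Claim_equal_uniqueShapesInMatrix : Prop := ∀ (grid : List (List Int)), Dom_uniqueShapesInMatrix grid → Pre_uniqueShapesInMatrix grid → Spec_uniqueShapesInMatrix grid (uniqueShapesInMatrix grid)

-- ===== LEMMAS AND PROOFS =====

-- proof-only shorthand for A's guard and visit step
def pvGuard (grid : List (List Int)) (rows cols : Int) (vis : PySem.Set (Int × Int))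
    (r c : Int) : Bool :=
  decide (r < 0 ∨ rows ≤ r ∨ c < 0 ∨ cols ≤ c ∨ pvCell grid r c = 0 ∨ (r, c) ∈ vis)

abbrev pvState := PySem.Set (Int × Int) × List (Int × Int)

def pvVisit (br bc : Int) (p : Int × Int) (s : pvState) : pvState :=
  (PySem.Set.add s.1 p, s.2 ++ [(p.1 - br, p.2 - bc)])

lemma pvDfsA_eq (grid : List (List Int)) (rows cols br bc : Int) (fuel : Nat)
    (p : Int × Int) (s : pvState) :
    pvDfsA grid rows cols br bc (fuel + 1) p s =
      if pvGuard grid rows cols s.1 p.1 p.2 then s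
      else pvDirs.foldl
        (fun t d => pvDfsA grid rows cols br bc fuel (p.1 + d.1, p.2 + d.2) t)
        (pvVisit br bc p s) := rfl

-- B's while loop rephrased with paired state and A's (negated) guard
def pvDfsB (grid : List (List Int)) (rows cols br bc : Int) :
    Nat → List (Int × Int) → pvState → pvState
  | 0, _, s => s
  | _ + 1, [], s => s
  | fuel + 1, p :: rest, s =>
    if pvGuard grid rows cols s.1 p.1 p.2 then
      pvDfsB grid rows cols br bc fuel rest s
    else
      pvDfsB grid rows cols br bc fuel
        (pvDirs.reverse.foldl (fun st d => (p.1 + d.1, p.2 + d.2) :: st) rest)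
        (pvVisit br bc p s)

lemma pvFloodB_eq (grid : List (List Int)) (rows cols br bc : Int) :
    ∀ (fuel : Nat) (stack : List (Int × Int)) (s : pvState),
      pvFloodB grid rows cols br bc fuel stack s.1 s.2
        = pvDfsB grid rows cols br bc fuel stack s := by
  intro fuel
  induction fuel with
  | zero => intro stack s; rfl
  | succ fuel ih =>
    intro stack s
    cases stack with
    | nil => rfl
    | cons p rest =>
      obtain ⟨cr, cc⟩ := p
      have hdirs : pvDirsB = pvDirs.reverse := by decide
      have hguard : (0 ≤ cr ∧ cr < rows ∧ 0 ≤ cc ∧ cc < cols ∧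
          pvCellB grid cr cc ≠ 0 ∧ (cr, cc) ∉ s.1) ↔
          ¬ (pvGuard grid rows cols s.1 cr cc = true) := by
        unfold pvGuard pvCellB pvCell
        simp only [decide_eq_true_eq, not_or]
        constructor
        · rintro ⟨h1, h2, h3, h4, h5, h6⟩
          exact ⟨by omega, by omega, by omega, by omega, h5, h6⟩
        · rintro ⟨h1, h2, h3, h4, h5, h6⟩
          exact ⟨by omega, by omega, by omega, by omega, h5, h6⟩
      show pvFloodB grid rows cols br bc (fuel + 1) ((cr, cc) :: rest) s.1 s.2 = _
      simp only [pvFloodB, pvDfsB]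
      by_cases hg : pvGuard grid rows cols s.1 cr cc = true
      · rw [if_neg (fun hc => (hguard.1 hc) hg), if_pos hg]
        exact ih rest s
      · rw [if_pos (hguard.2 hg), if_neg hg, hdirs]
        exact ih _ (pvVisit br bc (cr, cc) s)

-- all in-bounds cells, and the count of yet-unvisited ones (the termination measure)
def pvAll (rows cols : Int) : List (Int × Int) :=
  (PySem.List.pyRange 0 rows 1).flatMap
    (fun i => (PySem.List.pyRange 0 cols 1).map (fun j => (i, j)))

def pvU (rows cols : Int) (vis : PySem.Set (Int × Int)) : Nat :=
  ((pvAll rows cols).filter (fun p => decide (p ∉ vis))).length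

lemma pvMem_all (rows cols r c : Int) :
    (r, c) ∈ pvAll rows cols ↔ 0 ≤ r ∧ r < rows ∧ 0 ≤ c ∧ c < cols := by
  simp only [pvAll, List.mem_flatMap, List.mem_map, PySem.List.mem_pyRange_one,
    Prod.mk.injEq]
  constructor
  · rintro ⟨i, hi, j, hj, rfl, rfl⟩
    exact ⟨hi.1, hi.2, hj.1, hj.2⟩
  · rintro ⟨h1, h2, h3, h4⟩
    exact ⟨r, ⟨h1, h2⟩, c, ⟨h3, h4⟩, rfl, rfl⟩

lemma pvAll_nodup (rows cols : Int) : (pvAll rows cols).Nodup := by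
  refine List.nodup_flatMap.2 ⟨?_, ?_⟩
  · intro i _
    refine List.Nodup.map ?_ (PySem.List.nodup_pyRange_one (a := 0) (b := cols))
    intro a b h
    exact (Prod.ext_iff.1 h).2
  · refine List.Pairwise.imp ?_ (PySem.List.pairwise_lt_pyRange_one (a := 0) (b := rows))
    intro i j hij x hx1 hx2
    rcases List.mem_map.1 hx1 with ⟨a, _, rfl⟩
    rcases List.mem_map.1 hx2 with ⟨b, _, hb⟩
    have hji : j = i := (Prod.ext_iff.1 hb).1
    omega

lemma pvAll_length (rows cols : Int) :
    (pvAll rows cols).length = rows.toNat * cols.toNat := by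
  simp [pvAll, List.length_flatMap, PySem.List.length_pyRange_one,
    List.map_const', List.sum_replicate, smul_eq_mul]

lemma pvU_le (rows cols : Int) (vis : PySem.Set (Int × Int)) :
    pvU rows cols vis ≤ rows.toNat * cols.toNat := by
  unfold pvU
  calc ((pvAll rows cols).filter _).length ≤ (pvAll rows cols).length :=
        List.length_filter_le _ _
    _ = rows.toNat * cols.toNat := pvAll_length rows cols

lemma pvFilter_sub {α : Type} [DecidableEq α] (l : List α) (pr : α → Bool) (p : α)
    (hl : l.Nodup) (hp : p ∈ l) (hpr : pr p = true) :
    (l.filter (fun q => pr q && !decide (q = p))).length + 1 = (l.filter pr).length := by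
  induction l with
  | nil => cases hp
  | cons a l ih =>
    rcases List.mem_cons.1 hp with rfl | hp'
    · have hnotin : p ∉ l := (List.nodup_cons.1 hl).1
      have hfc : List.filter (fun q => pr q && !decide (q = p)) l = List.filter pr l := by
        apply List.filter_congr
        intro q hq
        have hqp : q ≠ p := fun h => hnotin (h ▸ hq)
        simp [hqp]
      simp [hpr]
      exact congrArg List.length hfc
    · have hl' := (List.nodup_cons.1 hl).2
      have hap : a ≠ p := fun h => (List.nodup_cons.1 hl).1 (h ▸ hp')
      have h2 := ih hl' hp'
      by_cases ha : pr a = true <;> simp [ha, hap] <;> exact h2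

lemma pvU_add (rows cols : Int) (vis : PySem.Set (Int × Int)) (p : Int × Int)
    (hall : p ∈ pvAll rows cols) (hnp : p ∉ vis) :
    pvU rows cols (PySem.Set.add vis p) + 1 = pvU rows cols vis := by
  have hfc : (pvAll rows cols).filter (fun q => decide (q ∉ PySem.Set.add vis p))
      = (pvAll rows cols).filter (fun q => decide (q ∉ vis) && !decide (q = p)) := by
    apply List.filter_congr
    intro q _
    by_cases h1 : q ∈ vis <;> by_cases h2 : q = p <;>
      simp [PySem.Set.mem_add, h1, h2]
  unfold pvU
  rw [hfc]
  exact pvFilter_sub _ _ _ (pvAll_nodup _ _) hall (by simpa using hnp)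

lemma pvU_mono (rows cols : Int) {vis vis' : PySem.Set (Int × Int)}
    (h : ∀ q, q ∈ vis → q ∈ vis') : pvU rows cols vis' ≤ pvU rows cols vis := by
  unfold pvU
  rw [← List.countP_eq_length_filter, ← List.countP_eq_length_filter]
  apply List.countP_mono_left
  intro a _ ha
  simp only [decide_eq_true_eq] at ha ⊢
  exact fun hv => ha (h a hv)

lemma pvU_pos (rows cols : Int) {vis : PySem.Set (Int × Int)} {p : Int × Int}
    (hall : p ∈ pvAll rows cols) (hnp : p ∉ vis) : 0 < pvU rows cols vis := by
  unfold pvU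
  exact List.length_pos_of_mem (List.mem_filter.2 ⟨hall, by simpa using hnp⟩)

lemma pvGuard_false {grid : List (List Int)} {rows cols : Int}
    {vis : PySem.Set (Int × Int)} {r c : Int}
    (h : ¬ pvGuard grid rows cols vis r c = true) :
    (r, c) ∈ pvAll rows cols ∧ (r, c) ∉ vis := by
  unfold pvGuard at h
  simp only [decide_eq_true_eq, not_or] at h
  exact ⟨(pvMem_all rows cols r c).2 ⟨by omega, by omega, by omega, by omega⟩, h.2.2.2.2.2⟩

lemma pvVisit_U {grid : List (List Int)} {rows cols br bc : Int}
    {p : Int × Int} {s : pvState}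
    (hg : ¬ pvGuard grid rows cols s.1 p.1 p.2 = true) :
    pvU rows cols (pvVisit br bc p s).1 + 1 = pvU rows cols s.1 := by
  have hb := pvGuard_false hg
  show pvU rows cols (PySem.Set.add s.1 p) + 1 = pvU rows cols s.1
  exact pvU_add rows cols s.1 p hb.1 hb.2

lemma pvFoldPres {σ α : Type} (P : σ → Prop) (f : σ → α → σ)
    (h : ∀ s a, P s → P (f s a)) :
    ∀ (l : List α) (s : σ), P s → P (l.foldl f s) := by
  intro l
  induction l with
  | nil => intro s hs; exact hs
  | cons a l ih => intro s hs; exact ih _ (h s a hs)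

lemma pvFoldCongInv {σ α : Type} (P : σ → Prop) (f g : σ → α → σ)
    (hpres : ∀ s a, P s → P (f s a)) (heq : ∀ s a, P s → f s a = g s a) :
    ∀ (l : List α) (s : σ), P s → l.foldl f s = l.foldl g s := by
  intro l
  induction l with
  | nil => intro s _; rfl
  | cons a l ih =>
    intro s hs
    rw [List.foldl_cons, List.foldl_cons, ← heq s a hs]
    exact ih _ (hpres s a hs)

lemma pvDfsA_mono (grid : List (List Int)) (rows cols br bc : Int) :
    ∀ (fuel : Nat) (p : Int × Int) (s : pvState) (q : Int × Int),
      q ∈ s.1 → q ∈ (pvDfsA grid rows cols br bc fuel p s).1 := by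
  intro fuel
  induction fuel with
  | zero => intro p s q hq; simpa [pvDfsA] using hq
  | succ fuel ih =>
    intro p s q hq
    rw [pvDfsA_eq]
    by_cases hg : pvGuard grid rows cols s.1 p.1 p.2 = true
    · rw [if_pos hg]; exact hq
    · rw [if_neg hg]
      refine pvFoldPres (σ := pvState) (α := Int × Int) (fun t => q ∈ t.1)
        (fun t d => pvDfsA grid rows cols br bc fuel (p.1 + d.1, p.2 + d.2) t)
        (fun t d ht => ih _ _ _ ht) pvDirs (pvVisit br bc p s) ?_
      exact (PySem.Set.mem_add s.1 p q).2 (Or.inl hq)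

lemma pvDfsA_U_le (grid : List (List Int)) (rows cols br bc : Int)
    (fuel : Nat) (p : Int × Int) (s : pvState) :
    pvU rows cols (pvDfsA grid rows cols br bc fuel p s).1 ≤ pvU rows cols s.1 :=
  pvU_mono rows cols (fun q hq => pvDfsA_mono grid rows cols br bc fuel p s q hq)

lemma pvDfsA_fuel (grid : List (List Int)) (rows cols br bc : Int) :
    ∀ (n fuel fuel' : Nat) (p : Int × Int) (s : pvState),
      pvU rows cols s.1 ≤ n → n < fuel → n < fuel' →
      pvDfsA grid rows cols br bc fuel p s = pvDfsA grid rows cols br bc fuel' p s := by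
  intro n
  induction n with
  | zero =>
    intro fuel fuel' p s hU hf hf'
    obtain ⟨f, rfl⟩ : ∃ f, fuel = f + 1 := ⟨fuel - 1, by omega⟩
    obtain ⟨f', rfl⟩ : ∃ f', fuel' = f' + 1 := ⟨fuel' - 1, by omega⟩
    rw [pvDfsA_eq, pvDfsA_eq]
    by_cases hg : pvGuard grid rows cols s.1 p.1 p.2 = true
    · rw [if_pos hg, if_pos hg]
    · exfalso
      have hb := pvGuard_false hg
      have := pvU_pos rows cols hb.1 hb.2
      omega
  | succ n ih =>
    intro fuel fuel' p s hU hf hf'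
    obtain ⟨f, rfl⟩ : ∃ f, fuel = f + 1 := ⟨fuel - 1, by omega⟩
    obtain ⟨f', rfl⟩ : ∃ f', fuel' = f' + 1 := ⟨fuel' - 1, by omega⟩
    rw [pvDfsA_eq, pvDfsA_eq]
    by_cases hg : pvGuard grid rows cols s.1 p.1 p.2 = true
    · rw [if_pos hg, if_pos hg]
    · rw [if_neg hg, if_neg hg]
      have hvis := pvVisit_U (grid := grid) (br := br) (bc := bc) hg
      refine pvFoldCongInv (σ := pvState) (α := Int × Int)
        (fun t => pvU rows cols t.1 ≤ n)
        (fun t d => pvDfsA grid rows cols br bc f (p.1 + d.1, p.2 + d.2) t)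
        (fun t d => pvDfsA grid rows cols br bc f' (p.1 + d.1, p.2 + d.2) t)
        ?_ ?_ pvDirs (pvVisit br bc p s) (by omega)
      · intro t d ht
        exact le_trans (pvDfsA_U_le grid rows cols br bc f _ t) ht
      · intro t d ht
        exact ih f f' _ t ht (by omega) (by omega)

lemma pvPush (p : Int × Int) (rest : List (Int × Int)) :
    pvDirs.reverse.foldl (fun st d => (p.1 + d.1, p.2 + d.2) :: st) rest
      = pvDirs.map (fun d => (p.1 + d.1, p.2 + d.2)) ++ rest := rfl

lemma pvDfsB_fuel (grid : List (List Int)) (rows cols br bc : Int) :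
    ∀ (n fuel fuel' : Nat) (stack : List (Int × Int)) (s : pvState),
      stack.length + 9 * pvU rows cols s.1 ≤ n → n < fuel → n < fuel' →
      pvDfsB grid rows cols br bc fuel stack s = pvDfsB grid rows cols br bc fuel' stack s := by
  intro n
  induction n with
  | zero =>
    intro fuel fuel' stack s h hf hf'
    obtain ⟨f, rfl⟩ : ∃ f, fuel = f + 1 := ⟨fuel - 1, by omega⟩
    obtain ⟨f', rfl⟩ : ∃ f', fuel' = f' + 1 := ⟨fuel' - 1, by omega⟩
    cases stack with
    | nil => simp [pvDfsB]
    | cons p rest => simp at h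
  | succ n ih =>
    intro fuel fuel' stack s h hf hf'
    obtain ⟨f, rfl⟩ : ∃ f, fuel = f + 1 := ⟨fuel - 1, by omega⟩
    obtain ⟨f', rfl⟩ : ∃ f', fuel' = f' + 1 := ⟨fuel' - 1, by omega⟩
    cases stack with
    | nil => simp [pvDfsB]
    | cons p rest =>
      have hlen1 : (p :: rest).length = rest.length + 1 := rfl
      simp only [pvDfsB]
      by_cases hg : pvGuard grid rows cols s.1 p.1 p.2 = true
      · rw [if_pos hg, if_pos hg]
        exact ih f f' rest s (by omega) (by omega) (by omega)
      · rw [if_neg hg, if_neg hg]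
        have hvis := pvVisit_U (grid := grid) (br := br) (bc := bc) hg
        rw [pvPush]
        have hlen : (pvDirs.map (fun d => (p.1 + d.1, p.2 + d.2)) ++ rest).length
            = rest.length + 8 := by simp [pvDirs]
        refine ih f f' _ _ ?_ (by omega) (by omega)
        rw [hlen]
        omega

-- A's dfs with its canonical (just-sufficient) fuel
def pvDfsAO (grid : List (List Int)) (rows cols br bc : Int)
    (p : Int × Int) (s : pvState) : pvState :=
  pvDfsA grid rows cols br bc (pvU rows cols s.1 + 1) p s

lemma pvSim (grid : List (List Int)) (rows cols br bc : Int) :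
    ∀ (n : Nat) (stack : List (Int × Int)) (s : pvState),
      stack.length + 9 * pvU rows cols s.1 ≤ n →
      pvDfsB grid rows cols br bc (stack.length + 9 * pvU rows cols s.1 + 1) stack s
        = stack.foldl (fun t q => pvDfsAO grid rows cols br bc q t) s := by
  intro n
  induction n with
  | zero =>
    intro stack s h
    cases stack with
    | nil => simp [pvDfsB]
    | cons p rest => simp at h
  | succ n ih =>
    intro stack s h
    cases stack with
    | nil => simp [pvDfsB]
    | cons p rest =>
      have hlen1 : (p :: rest).length = rest.length + 1 := rfl
      simp only [pvDfsB]
      by_cases hg : pvGuard grid rows cols s.1 p.1 p.2 = true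
      · rw [if_pos hg]
        have h1 : pvDfsB grid rows cols br bc ((p :: rest).length + 9 * pvU rows cols s.1) rest s
            = pvDfsB grid rows cols br bc (rest.length + 9 * pvU rows cols s.1 + 1) rest s :=
          pvDfsB_fuel grid rows cols br bc (rest.length + 9 * pvU rows cols s.1) _ _ _ _
            (le_refl _) (by omega) (by omega)
        rw [h1, ih rest s (by omega), List.foldl_cons]
        have hA : pvDfsAO grid rows cols br bc p s = s := by
          rw [pvDfsAO, pvDfsA_eq]
          rw [if_pos hg]
        rw [hA]
      · rw [if_neg hg]
        have hvis := pvVisit_U (grid := grid) (br := br) (bc := bc) hg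
        rw [pvPush]
        have hlen : (pvDirs.map (fun d => (p.1 + d.1, p.2 + d.2)) ++ rest).length
            = rest.length + 8 := by simp [pvDirs]
        have hfix : pvDfsB grid rows cols br bc ((p :: rest).length + 9 * pvU rows cols s.1)
              (pvDirs.map (fun d => (p.1 + d.1, p.2 + d.2)) ++ rest) (pvVisit br bc p s)
            = pvDfsB grid rows cols br bc
              ((pvDirs.map (fun d => (p.1 + d.1, p.2 + d.2)) ++ rest).length
                + 9 * pvU rows cols (pvVisit br bc p s).1 + 1)
              (pvDirs.map (fun d => (p.1 + d.1, p.2 + d.2)) ++ rest) (pvVisit br bc p s) :=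
          pvDfsB_fuel grid rows cols br bc
            (rest.length + 8 + 9 * pvU rows cols (pvVisit br bc p s).1) _ _ _ _
            (by rw [hlen]) (by omega) (by rw [hlen]; omega)
        rw [hfix, ih _ (pvVisit br bc p s) (by rw [hlen]; omega),
          List.foldl_append, List.foldl_map, List.foldl_cons]
        congr 1
        have hunf : pvDfsAO grid rows cols br bc p s
            = pvDirs.foldl (fun t d => pvDfsA grid rows cols br bc (pvU rows cols s.1)
                (p.1 + d.1, p.2 + d.2) t) (pvVisit br bc p s) := by
          rw [pvDfsAO, pvDfsA_eq]
          rw [if_neg hg]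
        rw [hunf]
        refine (pvFoldCongInv (σ := pvState) (α := Int × Int)
          (fun t => pvU rows cols t.1 ≤ pvU rows cols (pvVisit br bc p s).1)
          (fun t d => pvDfsAO grid rows cols br bc (p.1 + d.1, p.2 + d.2) t)
          (fun t d => pvDfsA grid rows cols br bc (pvU rows cols s.1)
            (p.1 + d.1, p.2 + d.2) t)
          ?_ ?_ pvDirs (pvVisit br bc p s) (le_refl _))
        · intro t d ht
          exact le_trans (pvDfsA_U_le grid rows cols br bc _ _ t) ht
        · intro t d ht
          exact pvDfsA_fuel grid rows cols br bc (pvU rows cols t.1) _ _ _ t (le_refl _)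
            (by omega) (by omega)

lemma pvKey (grid : List (List Int)) (rows cols br bc : Int) (vis : PySem.Set (Int × Int))
    (hRC : rows.toNat * cols.toNat ≤ (rows * cols).toNat) :
    pvDfsB grid rows cols br bc (9 * (rows * cols).toNat + 2) [(br, bc)]
        (vis, ([] : List (Int × Int)))
      = pvDfsA grid rows cols br bc ((rows * cols).toNat + 1) (br, bc)
        (vis, ([] : List (Int × Int))) := by
  have hle : pvU rows cols vis ≤ rows.toNat * cols.toNat := pvU_le rows cols vis
  have h1 : pvDfsB grid rows cols br bc (9 * (rows * cols).toNat + 2) [(br, bc)]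
        (vis, ([] : List (Int × Int)))
      = pvDfsB grid rows cols br bc
        (([(br, bc)] : List (Int × Int)).length
          + 9 * pvU rows cols (vis, ([] : List (Int × Int))).1 + 1)
        [(br, bc)] (vis, ([] : List (Int × Int))) :=
    pvDfsB_fuel grid rows cols br bc (1 + 9 * pvU rows cols vis) _ _ _ _
      (Nat.le_refl _) (by omega) (Nat.lt_succ_self _)
  rw [h1, pvSim grid rows cols br bc
      (([(br, bc)] : List (Int × Int)).length
        + 9 * pvU rows cols (vis, ([] : List (Int × Int))).1)
      [(br, bc)] (vis, ([] : List (Int × Int))) (le_refl _),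
    List.foldl_cons, List.foldl_nil, pvDfsAO]
  exact pvDfsA_fuel grid rows cols br bc (pvU rows cols vis) _ _ _ _ (le_refl _)
    (Nat.lt_succ_self _) (by omega)

-- the flat index loop over range(rows*cols) with divmod equals the nested loop
lemma pvFoldlId {σ : Type} (l : List Int) (init : σ) :
    l.foldl (fun st _ => st) init = init := by
  induction l generalizing init with
  | nil => rfl
  | cons a l ih => exact ih init

lemma pvFoldlCongrMem {σ α : Type} (l : List α) (f g : σ → α → σ)
    (h : ∀ a ∈ l, ∀ s, f s a = g s a) :
    ∀ init, l.foldl f init = l.foldl g init := by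
  induction l with
  | nil => intro init; rfl
  | cons a l ih =>
    intro init
    rw [List.foldl_cons, List.foldl_cons, h a (List.mem_cons_self)]
    exact ih (fun x hx s => h x (List.mem_cons_of_mem a hx) s) _

lemma pvFlat {σ : Type} (f : σ → Int → Int → σ) (m : Nat) :
    ∀ (n : Nat) (init : σ),
      (PySem.List.pyRange 0 ((n : Int) * (m : Int)) 1).foldl
          (fun st idx => f st (PySem.Int.floordiv idx (m : Int))
            (PySem.Int.mod idx (m : Int))) init
        = (PySem.List.pyRange 0 (n : Int) 1).foldl (fun st r =>
            (PySem.List.pyRange 0 (m : Int) 1).foldl (fun st c => f st r c) st) init := by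
  rcases Nat.eq_zero_or_pos m with hm | hm
  · intro n init
    subst hm
    rw [show (((0 : Nat) : Int)) = (0 : Int) from rfl, mul_zero,
      PySem.List.pyRange_one_eq_nil (le_refl (0 : Int)), List.foldl_nil]
    simp only [List.foldl_nil]
    exact (pvFoldlId _ init).symm
  · intro n
    induction n with
    | zero =>
      intro init
      simp [PySem.List.pyRange_one_eq_nil (le_refl (0 : Int))]
    | succ n ih =>
      intro init
      have hmpos : (0 : Int) < (m : Int) := by exact_mod_cast hm
      have hsplit : PySem.List.pyRange 0 ((↑(n + 1) : Int) * (m : Int)) 1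
          = PySem.List.pyRange 0 ((n : Int) * (m : Int)) 1
            ++ PySem.List.pyRange ((n : Int) * (m : Int)) ((↑(n + 1) : Int) * (m : Int)) 1 :=
        PySem.List.pyRange_one_append 0 ((n : Int) * (m : Int)) _
          (by positivity) (by push_cast; nlinarith)
      have hcast : ((n + 1 : Nat) : Int) = (n : Int) + 1 := by push_cast; ring
      have hrows : PySem.List.pyRange 0 ((n + 1 : Nat) : Int) 1
          = PySem.List.pyRange 0 (n : Int) 1 ++ [(n : Int)] := by
        rw [hcast]
        exact PySem.List.pyRange_one_succ_right (by positivity)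
      rw [hsplit, List.foldl_append, ih, hrows, List.foldl_append]
      simp only [List.foldl_cons, List.foldl_nil]
      -- the last block of m indices is row n, shifted by n*m
      have hmap : PySem.List.pyRange ((n : Int) * (m : Int)) ((↑(n + 1) : Int) * (m : Int)) 1
          = (PySem.List.pyRange 0 (m : Int) 1).map
              (fun x => (n : Int) * (m : Int) + x) := by
        rw [PySem.List.pyRange_one, PySem.List.pyRange_one,
          show ((↑(n + 1) : Int) * (m : Int)) - ((n : Int) * (m : Int))
            = (m : Int) - 0 by push_cast; ring, List.map_map]
        apply List.map_congr_left
        intro x _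
        simp
      rw [hmap, List.foldl_map]
      apply pvFoldlCongrMem
      intro k hk s
      have hkb := PySem.List.mem_pyRange_one.1 hk
      have hdiv : PySem.Int.floordiv ((n : Int) * (m : Int) + k) (m : Int) = (n : Int) := by
        rw [PySem.Int.floordiv_eq_ediv_of_pos hmpos,
          show (n : Int) * (m : Int) + k = k + (n : Int) * (m : Int) by ring,
          Int.add_mul_ediv_right _ _ (by omega : (m : Int) ≠ 0),
          Int.ediv_eq_zero_of_lt hkb.1 hkb.2]
        ring
      have hmod : PySem.Int.mod ((n : Int) * (m : Int) + k) (m : Int) = k := by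
        rw [PySem.Int.mod_eq_emod_of_pos hmpos,
          show (n : Int) * (m : Int) + k = k + (n : Int) * (m : Int) by ring,
          Int.add_mul_emod_self_right]
        exact Int.emod_eq_of_lt hkb.1 hkb.2
      rw [hdiv, hmod]

lemma pvMain (grid : List (List Int)) :
    uniqueShapesInMatrix grid = uniqueShapesInMatrix_alt grid := by
  unfold uniqueShapesInMatrix uniqueShapesInMatrix_alt
  have h1 : ((grid.length : Int) * (((PySem.List.pyGetD grid 0 []).length : Int)))
      = ((grid.length * (PySem.List.pyGetD grid 0 []).length : Nat) : Int) := by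
    push_cast; ring
  have hRC : (grid.length : Int).toNat * ((PySem.List.pyGetD grid 0 []).length : Int).toNat
      ≤ (((grid.length : Int)) * (((PySem.List.pyGetD grid 0 []).length : Int))).toNat := by
    simp only [h1, Int.toNat_natCast]
    exact le_refl _
  dsimp only
  congr 1
  rw [pvFlat (m := (PySem.List.pyGetD grid 0 []).length)
      (f := fun st r c =>
        if pvCellB grid r c ≠ 1 ∨ (r, c) ∈ st.1 then st
        else
          let res := pvFloodB grid (grid.length : Int)
            ((PySem.List.pyGetD grid 0 []).length : Int) r c
            (9 * (((grid.length : Int) * ((PySem.List.pyGetD grid 0 []).length : Int)).toNat)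
              + 2) [(r, c)] st.1 []
          (res.1, PySem.Set.add st.2 res.2))
      (n := grid.length)]
  apply congrArg
  apply pvFoldlCongrMem
  intro r _ st
  apply pvFoldlCongrMem
  intro c _ s
  by_cases h : pvCell grid r c = 1 ∧ (r, c) ∉ s.1
  · rw [if_pos h]
    have hnot : ¬ (pvCellB grid r c ≠ 1 ∨ (r, c) ∈ s.1) := by
      unfold pvCellB; unfold pvCell at h
      rw [not_or, not_not]
      exact ⟨h.1, h.2⟩
    rw [if_neg hnot]
    have hflood := pvFloodB_eq grid (grid.length : Int)
      ((PySem.List.pyGetD grid 0 []).length : Int) r c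
      (9 * (((grid.length : Int) * ((PySem.List.pyGetD grid 0 []).length : Int)).toNat) + 2)
      [(r, c)] (s.1, ([] : List (Int × Int)))
    have hkey := pvKey grid (grid.length : Int)
      ((PySem.List.pyGetD grid 0 []).length : Int) r c s.1 hRC
    simp only at hflood
    rw [hflood, hkey]
  · rw [if_neg h]
    have hyes : pvCellB grid r c ≠ 1 ∨ (r, c) ∈ s.1 := by
      unfold pvCellB; unfold pvCell at h
      by_cases h1 : PySem.List.pyGetD (PySem.List.pyGetD grid r []) c 0 = 1
      · right
        by_contra h2
        exact h ⟨h1, h2⟩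
      · left; exact h1
    rw [if_pos hyes]

-- ===== VERDICT (by name: the statement is the Claim_ definition above) =====
theorem uniqueShapesInMatrix_spec : Claim_equal_uniqueShapesInMatrix := by
  intro grid _ _
  unfold Spec_uniqueShapesInMatrix
  exact pvMain grid
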